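-- pv_equiv track=rewrite | github.com/RasmusBroborg/2020-06-19-LearningToCallFunctionsInsideOfClasses | pyfiles/coding_challenges/binary-to-decimals-func.py | binaryToDecimals
-- ===== SOURCE A (Python) =====
-- def binaryToDecimals(binaryNum):
--     length = len(str(binaryNum))
--     decimalsList = []
--     x = 0
--     y = length - 1
--
--
--     while x < length:
--         binaryDigit = int(str(binaryNum)[y]) * (2**x)
--         decimalsList += [binaryDigit]
--
--         y -= 1
--         x += 1
--
--     return sum(decimalsList)
-- ===== SOURCE B (Python) =====
-- def binaryToDecimals(binaryNum):
--     result = 0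
--     for ch in str(binaryNum):
--         result = result * 2 + int(ch)
--     return result
-- ===== Notes on version B (the rewrite author's own statement) =====
-- stated objective: simpler
-- what changed: Replaces the index-juggling while loop that builds a list of power-weighted digit terms (reading the string right-to-left) and sums it with a single left-to-right Horner accumulator that doubles and adds each digit.
import Mathlib
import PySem

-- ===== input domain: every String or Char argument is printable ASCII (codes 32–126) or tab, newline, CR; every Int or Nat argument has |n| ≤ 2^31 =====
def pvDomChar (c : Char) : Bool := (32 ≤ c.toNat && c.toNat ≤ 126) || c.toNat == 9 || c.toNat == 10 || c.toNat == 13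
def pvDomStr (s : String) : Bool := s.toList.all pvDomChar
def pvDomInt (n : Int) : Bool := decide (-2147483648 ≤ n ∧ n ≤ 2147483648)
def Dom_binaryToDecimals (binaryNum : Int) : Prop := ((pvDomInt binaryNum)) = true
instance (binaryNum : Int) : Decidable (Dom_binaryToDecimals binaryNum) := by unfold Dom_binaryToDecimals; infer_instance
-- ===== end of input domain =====

-- B replaces A's right-to-left power-weighted term list (built by a while loop and summed)
-- with a single left-to-right Horner accumulator; same return value on all nonnegative inputs.


-- ===== PORT A =====
-- while x < length, with y = length-1-x, appending int(str(binaryNum)[y]) * 2**x; then sum.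
-- int(single char) is PySem.Int.ofChars? [c] (none = ValueError, excluded by Pre_; .getD 0 there).
def binaryToDecimals (binaryNum : Int) : Int :=
  let s := PySem.Int.toChars binaryNum
  let length := s.length
  let decimalsList := (List.range length).map (fun (x : Nat) =>
    ((PySem.Int.ofChars? [PySem.List.pyGetD s ((length : Int) - 1 - (x : Int)) ' ']).getD 0) * 2 ^ x)
  decimalsList.sum

-- ===== PORT B =====
-- result = 0; for ch in str(binaryNum): result = result*2 + int(ch)
def binaryToDecimals_alt (binaryNum : Int) : Int :=
  (PySem.Int.toChars binaryNum).foldl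
    (fun r c => r * 2 + ((PySem.Int.ofChars? [c]).getD 0)) 0

-- ===== PRECONDITION & SPEC =====
-- On negative inputs str(binaryNum) starts with '-' and both A and B raise ValueError on int('-');
-- Pre_ excludes exactly those inputs.
def Pre_binaryToDecimals (binaryNum : Int) : Prop := 0 ≤ binaryNum
instance (binaryNum : Int) : Decidable (Pre_binaryToDecimals binaryNum) := by
  unfold Pre_binaryToDecimals; infer_instance
def pvWitness_binaryToDecimals : Int := 110101

def Spec_binaryToDecimals (binaryNum : Int) (out : Int) : Prop := out = binaryToDecimals_alt binaryNum
instance (binaryNum : Int) (out : Int) : Decidable (Spec_binaryToDecimals binaryNum out) := by unfold Spec_binaryToDecimals; infer_instance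

-- ===== CLAIM (what is proved, stated in full; the proofs are below) =====
def Claim_equal_binaryToDecimals : Prop := ∀ (binaryNum : Int), Dom_binaryToDecimals binaryNum → Pre_binaryToDecimals binaryNum → Spec_binaryToDecimals binaryNum (binaryToDecimals binaryNum)

-- ===== LEMMAS AND PROOFS =====

-- Horner fold with an arbitrary initial accumulator.
theorem horner_foldl_init (D : Char → Int) (l : List Char) (r : Int) :
    l.foldl (fun a c => a * 2 + D c) r
      = r * 2 ^ l.length + l.foldl (fun a c => a * 2 + D c) 0 := by
  induction l generalizing r with
  | nil => simp
  | cons c t ih =>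
      simp only [List.foldl_cons, List.length_cons]
      rw [ih (r * 2 + D c), ih (0 * 2 + D c)]
      ring

-- The power-weighted sum over the reversed indices equals the Horner fold, for ANY digit map D.
theorem powersum_eq_horner (D : Char → Int) (l : List Char) :
    ((List.range l.length).map (fun (x : Nat) =>
        D (PySem.List.pyGetD l ((l.length : Int) - 1 - (x : Int)) ' ') * 2 ^ x)).sum
      = l.foldl (fun a c => a * 2 + D c) 0 := by
  induction l with
  | nil => simp
  | cons c t ih =>
      have hlen : (c :: t).length = t.length + 1 := rfl
      rw [hlen, List.range_succ, List.map_append, List.sum_append]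
      have hlast :
          ((List.range t.length).map (fun (x : Nat) =>
            D (PySem.List.pyGetD (c :: t) ((↑(t.length + 1) : Int) - 1 - (x : Int)) ' ') * 2 ^ x))
          = ((List.range t.length).map (fun (x : Nat) =>
            D (PySem.List.pyGetD t ((↑t.length : Int) - 1 - (x : Int)) ' ') * 2 ^ x)) := by
        apply List.map_congr_left
        intro x hx
        have hxlt : x < t.length := List.mem_range.mp hx
        have h1 : ((↑(t.length + 1) : Int) - 1 - (x : Int)) = ((t.length - x : Nat) : Int) := by
          omega
        have h2 : ((↑t.length : Int) - 1 - (x : Int)) = ((t.length - 1 - x : Nat) : Int) := by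
          omega
        rw [h1, h2, PySem.List.pyGetD_natCast, PySem.List.pyGetD_natCast]
        have h3 : t.length - x = (t.length - 1 - x) + 1 := by omega
        rw [h3, List.getD_cons_succ]
      have hzero : ((↑(t.length + 1) : Int) - 1 - ((t.length : Nat) : Int)) = 0 := by omega
      rw [hlast, ih]
      simp only [List.map_cons, List.map_nil, List.sum_cons, List.sum_nil, hzero,
        PySem.List.pyGetD_zero_cons, List.foldl_cons]
      rw [horner_foldl_init D t (0 * 2 + D c)]
      ring

-- ===== VERDICT (by name: the statement is the Claim_ definition above) =====
theorem binaryToDecimals_spec : Claim_equal_binaryToDecimals := by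
  intro n _ _
  show binaryToDecimals n = binaryToDecimals_alt n
  unfold binaryToDecimals binaryToDecimals_alt
  exact powersum_eq_horner (fun c => (PySem.Int.ofChars? [c]).getD 0) (PySem.Int.toChars n)
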